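-- pv_equiv track=rewrite | github.com/badmonkey/code-monkey-toolset | codemonkey/lib/slugify.py | trim_to_length
-- ===== SOURCE A (Python) =====
-- def trim_to_length(words, max_length):
--     if max_length:
--         new_words = []
--         for word in words:
--             if len(word) + len(new_words) <= max_length:
--                 max_length -= len(word)
--                 new_words.append(word)
--             else:
--                 break
--         if not new_words:
--             new_words.append(words[0][:max_length])
--         return new_words
--
--     return words
-- ===== SOURCE B (Python) =====
-- def trim_to_length(words, max_length):
--     if not max_length:
--         return words
--     cums = []
--     total = 0
--     for w in words:
--         total += len(w)
--         cums.append(total)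
--     kept = [w for i, (w, c) in enumerate(zip(words, cums)) if c + i <= max_length]
--     return kept if kept else [words[0][:max_length]]
-- ===== Notes on version B (the rewrite author's own statement) =====
-- stated objective: alternative
-- what changed: B replaces A's early-break loop with a decrementing budget by precomputing cumulative word lengths and selecting word i by the monotone condition cum_i + i <= max_length in a single filtering pass (no mutable budget, no break); equivalence rests on the condition being strictly increasing, so the filter equals A's maximal prefix.
import Mathlib
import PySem

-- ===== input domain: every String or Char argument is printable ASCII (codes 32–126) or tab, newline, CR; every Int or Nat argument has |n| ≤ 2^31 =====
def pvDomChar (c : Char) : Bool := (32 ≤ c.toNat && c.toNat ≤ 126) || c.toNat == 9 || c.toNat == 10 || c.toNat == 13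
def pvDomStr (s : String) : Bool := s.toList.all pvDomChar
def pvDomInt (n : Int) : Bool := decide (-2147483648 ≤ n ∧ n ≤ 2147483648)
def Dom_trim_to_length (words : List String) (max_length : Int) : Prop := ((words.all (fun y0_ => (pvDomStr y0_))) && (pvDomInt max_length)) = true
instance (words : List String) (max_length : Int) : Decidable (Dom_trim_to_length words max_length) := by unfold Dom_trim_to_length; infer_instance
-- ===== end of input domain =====

-- B selects words by the monotone condition cum_i + i <= max_length in one filtering pass,
-- instead of A's early-break loop with a decrementing budget (objective: alternative).

-- ===== PORT A =====
-- A's for-loop with break: structural recursion over the remaining words,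
-- carrying the mutable (max_length, new_words) state.
def trimGoA : List String → Int → List String → Int × List String
  | [], budget, acc => (budget, acc)
  | w :: rest, budget, acc =>
    if PySem.Str.len w + (acc.length : Int) ≤ budget then
      trimGoA rest (budget - PySem.Str.len w) (acc ++ [w])
    else (budget, acc)

def trim_to_length (words : List String) (max_length : Int) : List String :=
  if max_length ≠ 0 then
    let r := trimGoA words max_length []
    if r.2.isEmpty then
      match PySem.List.pyGet? words 0 with
      | some w => [PySem.Str.slice w none (some r.1)]
      | none => []   -- Python raises IndexError here; excluded by Pre_
    else r.2
  else words

-- ===== PORT B =====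
-- Source B's cumulative-sums loop: fold carrying (total, cums).
def cumsB (words : List String) : List Int :=
  (words.foldl (fun (st : Int × List Int) w =>
      (st.1 + PySem.Str.len w, st.2 ++ [st.1 + PySem.Str.len w])) ((0 : Int), ([] : List Int))).2

def trim_to_length_alt (words : List String) (max_length : Int) : List String :=
  if max_length ≠ 0 then
    let kept := ((PySem.List.enumerate (words.zip (cumsB words)) 0).filter
        (fun p => decide (p.2.2 + p.1 ≤ max_length))).map (fun p => p.2.1)
    if kept.isEmpty then
      match PySem.List.pyGet? words 0 with
      | some w => [PySem.Str.slice w none (some max_length)]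
      | none => []   -- Python raises IndexError here; excluded by Pre_
    else kept
  else words

-- ===== PRECONDITION & SPEC =====
-- Pre_ excludes only the inputs where Python A raises IndexError (words empty with a
-- nonzero max_length, where words[0] is evaluated); B raises there too.
def Pre_trim_to_length (words : List String) (max_length : Int) : Prop :=
  max_length = 0 ∨ words ≠ []
instance (words : List String) (max_length : Int) : Decidable (Pre_trim_to_length words max_length) := by unfold Pre_trim_to_length; infer_instance

def pvWitness_trim_to_length : List String × Int := (["ab", "cde"], 5)

def Spec_trim_to_length (words : List String) (max_length : Int) (out : List String) : Prop := out = trim_to_length_alt words max_length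
instance (words : List String) (max_length : Int) (out : List String) : Decidable (Spec_trim_to_length words max_length out) := by unfold Spec_trim_to_length; infer_instance

-- ===== CLAIM (what is proved, stated in full; the proofs are below) =====
def Claim_equal_trim_to_length : Prop := ∀ (words : List String) (max_length : Int), Dom_trim_to_length words max_length → Pre_trim_to_length words max_length → Spec_trim_to_length words max_length (trim_to_length words max_length)

-- ===== LEMMAS AND PROOFS =====

-- The words A keeps, described functionally: word at relative position k (with S the sum of
-- lengths already kept) is kept iff its length plus k fits in M - S, and the scan stops at
-- the first failure.
def keptF (M : Int) : List String → Int → Nat → List String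
  | [], _, _ => []
  | w :: rest, S, k =>
    if PySem.Str.len w + (k : Int) ≤ M - S then
      w :: keptF M rest (S + PySem.Str.len w) (k + 1)
    else []

-- cumulative sums, functionally
def cumL (S : Int) : List String → List Int
  | [] => []
  | w :: rest => (S + PySem.Str.len w) :: cumL (S + PySem.Str.len w) rest

theorem len_nonneg (w : String) : 0 ≤ PySem.Str.len w := by
  simp [PySem.Str.len_eq]

theorem trimGoA_snd (ws : List String) : ∀ (M S : Int) (acc : List String),
    (trimGoA ws (M - S) acc).2 = acc ++ keptF M ws S acc.length := by
  induction ws with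
  | nil => intro M S acc; simp [trimGoA, keptF]
  | cons w rest ih =>
    intro M S acc
    by_cases h : PySem.Str.len w + (acc.length : Int) ≤ M - S
    · have h2 : M - S - PySem.Str.len w = M - (S + PySem.Str.len w) := by ring
      simp only [trimGoA, keptF]
      rw [if_pos h, if_pos h, h2, ih M (S + PySem.Str.len w) (acc ++ [w])]
      simp
    · simp only [trimGoA, keptF]
      rw [if_neg h, if_neg h]
      simp

theorem trimGoA_fst_of_empty (ws : List String) (M : Int)
    (h : (trimGoA ws M []).2 = []) : (trimGoA ws M []).1 = M := by
  cases ws with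
  | nil => simp [trimGoA]
  | cons w rest =>
    by_cases hc : PySem.Str.len w + ((List.length ([] : List String)) : Int) ≤ M
    · exfalso
      have h0 : (trimGoA (w :: rest) (M - 0) []).2 = [] ++ keptF M (w :: rest) 0 [].length := trimGoA_snd _ M 0 []
      simp only [sub_zero, List.nil_append, List.length_nil] at h0
      rw [h] at h0
      simp only [List.length_nil, Nat.cast_zero] at hc
      rw [keptF, if_pos (by simpa using hc)] at h0
      exact List.cons_ne_nil _ _ h0.symm
    · simp only [trimGoA, if_neg hc]

theorem cumsB_eq (ws : List String) : ∀ (S : Int) (pre : List Int),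
    (ws.foldl (fun (st : Int × List Int) w =>
      (st.1 + PySem.Str.len w, st.2 ++ [st.1 + PySem.Str.len w])) (S, pre)).2
      = pre ++ cumL S ws := by
  induction ws with
  | nil => intro S pre; simp [cumL]
  | cons w rest ih =>
    intro S pre
    simp only [List.foldl_cons, cumL, ih (S + PySem.Str.len w) (pre ++ [S + PySem.Str.len w])]
    simp

theorem mem_enum_cum_lb (ws : List String) : ∀ (S : Int) (k : Nat)
    (p : Int × (String × Int)),
    p ∈ PySem.List.enumerate (ws.zip (cumL S ws)) (k : Int) →
    S + (k : Int) ≤ p.2.2 + p.1 := by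
  induction ws with
  | nil => intro S k p hp; simp [cumL, PySem.List.enumerate_nil] at hp
  | cons w rest ih =>
    intro S k p hp
    rw [cumL, List.zip_cons_cons, PySem.List.enumerate_cons] at hp
    rcases List.mem_cons.mp hp with h | h
    · subst h
      have := len_nonneg w
      show S + (k : Int) ≤ (S + PySem.Str.len w) + (k : Int)
      omega
    · have h1 : ((k : Int) + 1) = ((k + 1 : Nat) : Int) := by push_cast; ring
      rw [h1] at h
      have := ih (S + PySem.Str.len w) (k + 1) p h
      have := len_nonneg w
      push_cast at *
      omega

theorem filter_enum_eq_keptF (M : Int) (ws : List String) : ∀ (S : Int) (k : Nat),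
    (((PySem.List.enumerate (ws.zip (cumL S ws)) (k : Int)).filter
        (fun p => decide (p.2.2 + p.1 ≤ M))).map (fun p => p.2.1))
      = keptF M ws S k := by
  induction ws with
  | nil => intro S k; simp [cumL, keptF, PySem.List.enumerate_nil]
  | cons w rest ih =>
    intro S k
    rw [cumL, List.zip_cons_cons, PySem.List.enumerate_cons, keptF]
    by_cases h : PySem.Str.len w + (k : Int) ≤ M - S
    · have hc : S + PySem.Str.len w + (k : Int) ≤ M := by omega
      have h1 : ((k : Int) + 1) = ((k + 1 : Nat) : Int) := by push_cast; ring
      rw [List.filter_cons]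
      simp only [decide_eq_true_eq]
      rw [if_pos hc, if_pos h, List.map_cons, h1, ih (S + PySem.Str.len w) (k + 1)]
    · have hc : ¬ (S + PySem.Str.len w + (k : Int) ≤ M) := by omega
      rw [List.filter_cons]
      simp only [decide_eq_true_eq]
      rw [if_neg hc, if_neg h]
      have hnil : (PySem.List.enumerate (rest.zip (cumL (S + PySem.Str.len w) rest)) ((k : Int) + 1)).filter
          (fun p => decide (p.2.2 + p.1 ≤ M)) = [] := by
        rw [List.filter_eq_nil_iff]
        intro p hp
        have h1 : ((k : Int) + 1) = ((k + 1 : Nat) : Int) := by push_cast; ring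
        rw [h1] at hp
        have := mem_enum_cum_lb rest (S + PySem.Str.len w) (k + 1) p hp
        simp only [decide_eq_true_eq]
        push_cast at *
        omega
      rw [hnil, List.map_nil]

theorem kept_eq (words : List String) (M : Int) :
    ((PySem.List.enumerate (words.zip (cumsB words)) 0).filter
        (fun p => decide (p.2.2 + p.1 ≤ M))).map (fun p => p.2.1)
      = (trimGoA words M []).2 := by
  have hc : cumsB words = cumL 0 words := by
    unfold cumsB; rw [cumsB_eq words 0 []]; simp
  have h0 : (trimGoA words (M - 0) []).2 = [] ++ keptF M words 0 [].length := trimGoA_snd words M 0 []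
  simp only [sub_zero, List.nil_append, List.length_nil] at h0
  rw [hc, h0]
  have := filter_enum_eq_keptF M words 0 0
  simpa using this

-- ===== VERDICT (by name: the statement is the Claim_ definition above) =====
theorem trim_to_length_spec : Claim_equal_trim_to_length := by
  intro words M _dom _pre
  unfold Spec_trim_to_length trim_to_length trim_to_length_alt
  by_cases hM : M ≠ 0
  · simp only [if_pos hM]
    rw [kept_eq words M]
    by_cases he : (trimGoA words M []).2.isEmpty
    · have he' : (trimGoA words M []).2 = [] := by simpa [List.isEmpty_iff] using he
      rw [trimGoA_fst_of_empty words M he']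
    · rw [if_neg he, if_neg he]
  · simp [hM]
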